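-- pv_equiv track=rewrite | github.com/sixty-north/added-value | added_value/tabulator.py | strip_hidden
-- ===== SOURCE A (Python) =====
-- def strip_hidden(key_tuples, visibilities):
--     """Filter each tuple according to visibility.
--
--     Args:
--         key_tuples: A sequence of tuples of equal length (i.e. rectangular)
--         visibilities: A sequence of booleans equal in length to the tuples contained in key_tuples.
--
--     Returns:
--         A sequence equal in length to key_tuples where the items are tuples with a length corresponding
--         to the number of items in visibility which are True.
--     """
--     result = []
--     for key_tuple in key_tuples:
--         if len(key_tuple) != len(visibilities):
--             raise ValueError("length of key tuple {} is not equal to length of visibilities {}".format(key_tuple, visibilities))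
--         filtered_tuple = tuple(item for item, visible in zip(key_tuple, visibilities) if visible)
--         result.append(filtered_tuple)
--     return result
-- ===== SOURCE B (Python) =====
-- def strip_hidden(key_tuples, visibilities):
--     for key_tuple in key_tuples:
--         if len(key_tuple) != len(visibilities):
--             raise ValueError("length of key tuple {} is not equal to length of visibilities {}".format(key_tuple, visibilities))
--     rows = [[] for _ in key_tuples]
--     for j, visible in enumerate(visibilities):
--         if visible:
--             for row, key_tuple in zip(rows, key_tuples):
--                 row.append(key_tuple[j])
--     return [tuple(row) for row in rows]
-- ===== Notes on version B (the rewrite author's own statement) =====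
-- stated objective: alternative
-- what changed: B validates all row lengths up front and then traverses column-major: the outer loop runs over visible column indices and appends each column's values onto per-row accumulators, instead of filtering every row independently by zipping it with the flags.
import Mathlib
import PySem

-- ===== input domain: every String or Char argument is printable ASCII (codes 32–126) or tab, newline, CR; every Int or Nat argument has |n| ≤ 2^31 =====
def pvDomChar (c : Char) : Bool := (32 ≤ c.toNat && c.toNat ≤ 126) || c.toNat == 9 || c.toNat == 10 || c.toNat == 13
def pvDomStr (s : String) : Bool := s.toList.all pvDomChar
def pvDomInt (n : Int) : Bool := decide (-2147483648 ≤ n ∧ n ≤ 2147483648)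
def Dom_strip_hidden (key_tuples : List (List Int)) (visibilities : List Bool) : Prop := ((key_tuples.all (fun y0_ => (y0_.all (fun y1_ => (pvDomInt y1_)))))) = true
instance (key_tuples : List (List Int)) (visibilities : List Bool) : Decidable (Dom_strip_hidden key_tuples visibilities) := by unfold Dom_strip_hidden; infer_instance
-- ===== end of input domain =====

-- B validates all lengths up front, then builds the result column-major (outer loop over
-- visible column indices, appending onto per-row accumulators) instead of filtering each row.

-- ===== PORT A =====
-- for key_tuple in key_tuples: check length (raise → excluded by Pre_),
-- filtered = tuple(item for item, visible in zip(key_tuple, visibilities) if visible)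
def strip_hidden (key_tuples : List (List Int)) (visibilities : List Bool) : List (List Int) :=
  match key_tuples with
  | [] => []
  | kt :: rest =>
    if kt.length ≠ visibilities.length then []  -- raise ValueError (outside Pre_)
    else ((kt.zip visibilities).filterMap (fun p => if p.2 then some p.1 else none))
          :: strip_hidden rest visibilities

-- ===== PORT B =====
-- enumerate(visibilities) starting at index j
def enumFromB (j : Int) (vs : List Bool) : List (Int × Bool) :=
  match vs with
  | [] => []
  | v :: rest => (j, v) :: enumFromB (j + 1) rest

-- for j, visible in enumerate(visibilities): if visible: append key_tuple[j] to each row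
-- (pyGet? is exact Python indexing; getD 0 is never taken on admitted inputs)
def colLoop (key_tuples : List (List Int)) (rows : List (List Int))
    (pairs : List (Int × Bool)) : List (List Int) :=
  match pairs with
  | [] => rows
  | (j, visible) :: rest =>
    colLoop key_tuples
      (if visible then
        List.zipWith (fun row kt => row ++ [(PySem.List.pyGet? kt j).getD 0]) rows key_tuples
       else rows) rest

def strip_hidden_alt (key_tuples : List (List Int)) (visibilities : List Bool) : List (List Int) :=
  if key_tuples.any (fun kt => kt.length ≠ visibilities.length) then []  -- raise ValueError (outside Pre_)
  else colLoop key_tuples (key_tuples.map (fun _ => [])) (enumFromB 0 visibilities)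

-- ===== PRECONDITION & SPEC =====
-- A raises ValueError on any tuple whose length differs from len(visibilities); exactly those inputs are excluded.
def Pre_strip_hidden (key_tuples : List (List Int)) (visibilities : List Bool) : Prop :=
  ∀ kt ∈ key_tuples, kt.length = visibilities.length
instance (key_tuples : List (List Int)) (visibilities : List Bool) : Decidable (Pre_strip_hidden key_tuples visibilities) := by unfold Pre_strip_hidden; infer_instance
def pvWitness_strip_hidden : List (List Int) × List Bool := ([[1, 2], [3, 4]], [true, false])

def Spec_strip_hidden (key_tuples : List (List Int)) (visibilities : List Bool) (out : List (List Int)) : Prop := out = strip_hidden_alt key_tuples visibilities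
instance (key_tuples : List (List Int)) (visibilities : List Bool) (out : List (List Int)) : Decidable (Spec_strip_hidden key_tuples visibilities out) := by unfold Spec_strip_hidden; infer_instance

-- ===== CLAIM =====
def Claim_equal_strip_hidden : Prop := ∀ (key_tuples : List (List Int)) (visibilities : List Bool), Dom_strip_hidden key_tuples visibilities → Pre_strip_hidden key_tuples visibilities → Spec_strip_hidden key_tuples visibilities (strip_hidden key_tuples visibilities)

-- ===== LEMMAS AND PROOFS =====

-- one row's filter, as A computes it
def rowFilter (kt : List Int) (vs : List Bool) : List Int :=
  (kt.zip vs).filterMap (fun p => if p.2 then some p.1 else none)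

theorem zipWith_map_left_self {α β : Type} (l : List α) (f : α → β) (g : β → α → β) :
    List.zipWith g (l.map f) l = l.map (fun x => g (f x) x) := by
  induction l with
  | nil => rfl
  | cons x xs ih => simp [ih]

theorem rowFilter_drop (kt : List Int) (vs' : List Bool) (v : Bool) (j : ℕ)
    (hj : kt.length = j + (vs'.length + 1)) :
    rowFilter (kt.drop j) (v :: vs')
      = (if v then [kt.getD j 0] else []) ++ rowFilter (kt.drop (j + 1)) vs' := by
  have hlt : j < kt.length := by omega
  simp only [rowFilter]
  rw [← List.getElem_cons_drop hlt]
  simp only [List.zip_cons_cons, List.filterMap_cons]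
  cases v <;> simp [List.getD, List.getElem?_eq_getElem hlt]

theorem colLoop_invariant (vs' : List Bool) :
    ∀ (j : ℕ) (kts : List (List Int)) (f : List Int → List Int),
      (∀ kt ∈ kts, kt.length = j + vs'.length) →
      colLoop kts (kts.map f) (enumFromB (j : Int) vs')
        = kts.map (fun kt => f kt ++ rowFilter (kt.drop j) vs') := by
  induction vs' with
  | nil =>
    intro j kts f _
    simp [enumFromB, colLoop, rowFilter]
  | cons v vs' ih =>
    intro j kts f hlen
    have hstep : ((j : Int) + 1) = ((j + 1 : ℕ) : Int) := by push_cast; ring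
    have hget : ∀ kt ∈ kts, (PySem.List.pyGet? kt (j : Int)).getD 0 = kt.getD j 0 := by
      intro kt hkt
      have hlt : j < kt.length := by have := hlen kt hkt; simp at this; omega
      simp [PySem.List.pyGet?_natCast, List.getD, List.getElem?_eq_getElem hlt]
    have hlen' : ∀ kt ∈ kts, kt.length = (j + 1) + vs'.length := by
      intro kt hkt; have := hlen kt hkt; simp at this ⊢; omega
    have hdrop : ∀ kt ∈ kts, kt.length = j + (vs'.length + 1) := by
      intro kt hkt; have := hlen kt hkt; simpa using this
    cases v with
    | true =>
      simp only [enumFromB, colLoop, if_true]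
      rw [zipWith_map_left_self, hstep,
        ih (j + 1) kts (fun kt => f kt ++ [(PySem.List.pyGet? kt (j : Int)).getD 0]) hlen']
      apply List.map_congr_left
      intro kt hkt
      rw [hget kt hkt, rowFilter_drop kt vs' true j (hdrop kt hkt)]
      simp
    | false =>
      simp only [enumFromB, colLoop, if_false, Bool.false_eq_true]
      rw [hstep, ih (j + 1) kts f hlen']
      apply List.map_congr_left
      intro kt hkt
      rw [rowFilter_drop kt vs' false j (hdrop kt hkt)]
      simp

theorem strip_hidden_eq_map (key_tuples : List (List Int)) (visibilities : List Bool)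
    (hpre : Pre_strip_hidden key_tuples visibilities) :
    strip_hidden key_tuples visibilities
      = key_tuples.map (fun kt => rowFilter kt visibilities) := by
  induction key_tuples with
  | nil => simp [strip_hidden]
  | cons kt rest ih =>
    have hkt : kt.length = visibilities.length := hpre kt (by simp)
    have hrest : Pre_strip_hidden rest visibilities := fun t ht => hpre t (by simp [ht])
    simp [strip_hidden, hkt, rowFilter, ih hrest]

-- ===== VERDICT =====
theorem strip_hidden_spec : Claim_equal_strip_hidden := by
  intro kts vs _ hpre
  unfold Spec_strip_hidden strip_hidden_alt
  have hany : kts.any (fun kt => kt.length ≠ vs.length) = false := by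
    simp only [List.any_eq_false]
    intro kt hkt
    simp [hpre kt hkt]
  rw [hany, if_neg (by simp)]
  have h0 : ((0 : ℕ) : Int) = (0 : Int) := rfl
  rw [← h0, colLoop_invariant vs 0 kts (fun _ => []) (by intro kt h; simpa using hpre kt h)]
  rw [strip_hidden_eq_map kts vs hpre]
  simp
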